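-- pv_equiv track=rewrite | github.com/dannysmith/mc-infra | shared/scripts/mclib.py | next_bluemap_port
-- ===== SOURCE A (Python) =====
-- BLUEMAP_PORT_BASE = 8100
--
-- def next_bluemap_port(servers):
--     """Find the next available BlueMap port starting from 8100."""
--     used = set()
--     for s in servers.values():
--         port = s.get('bluemap_port')
--         if port is not None:
--             used.add(port)
--     port = BLUEMAP_PORT_BASE
--     while port in used:
--         port += 1
--     return port
-- ===== SOURCE B (Python) =====
-- BLUEMAP_PORT_BASE = 8100
--
-- def next_bluemap_port(servers):
--     """Find the next available BlueMap port starting from 8100."""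
--     ports = sorted(p for p in (s.get('bluemap_port') for s in servers.values())
--                    if p is not None)
--     candidate = BLUEMAP_PORT_BASE
--     for p in ports:
--         if p < candidate:
--             continue
--         if p == candidate:
--             candidate += 1
--         else:
--             break
--     return candidate
-- ===== Notes on version B (the rewrite author's own statement) =====
-- stated objective: alternative
-- what changed: Replaced the set-membership upward probe (try 8100, 8101, ... until not in the used set) by collecting the bluemap ports, sorting them, and finding the first gap at or above 8100 in a single scan with early break.
import Mathlib
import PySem

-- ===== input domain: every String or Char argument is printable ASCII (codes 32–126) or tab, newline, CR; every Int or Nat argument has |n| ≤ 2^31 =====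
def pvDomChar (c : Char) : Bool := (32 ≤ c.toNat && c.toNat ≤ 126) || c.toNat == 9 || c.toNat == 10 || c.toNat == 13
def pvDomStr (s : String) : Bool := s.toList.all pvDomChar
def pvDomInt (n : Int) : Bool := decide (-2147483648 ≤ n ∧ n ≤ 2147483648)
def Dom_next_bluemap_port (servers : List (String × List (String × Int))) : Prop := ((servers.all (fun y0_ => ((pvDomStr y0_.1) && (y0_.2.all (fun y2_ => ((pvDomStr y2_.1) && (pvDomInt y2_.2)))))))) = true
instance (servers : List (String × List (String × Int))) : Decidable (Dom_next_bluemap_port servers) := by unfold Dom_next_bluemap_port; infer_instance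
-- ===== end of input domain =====

-- B replaces A's set-membership upward probe by sort-then-single-scan gap finding (alternative decomposition, same result).

-- ===== PORT A =====
-- s.get('bluemap_port') (first-match dict lookup)
def pvGetBluemap (s : List (String × Int)) : Option Int :=
  PySem.Dict.get? (PySem.Dict.mk s) "bluemap_port"

-- used = set(); for s in servers.values(): … used.add(port)
def pvUsedA (servers : List (String × List (String × Int))) : PySem.Set Int :=
  servers.foldl (fun used sv =>
    match pvGetBluemap sv.2 with
    | some p => PySem.Set.add used p
    | none => used) PySem.Set.empty

-- termination helper for the while loop below
theorem pv_countP_lt (used : List Int) (port : Int) (h : port ∈ used) :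
    used.countP (fun x => decide (port + 1 ≤ x)) < used.countP (fun x => decide (port ≤ x)) := by
  have e : used.countP (fun x => decide (port + 1 ≤ x)) = used.countP (fun x => decide (port < x)) :=
    List.countP_congr (by intro x _; simp)
  rw [e]
  induction used with
  | nil => simp at h
  | cons a t ih =>
    rcases List.mem_cons.mp h with rfl | hm
    · have hmono : t.countP (fun x => decide (port < x)) ≤ t.countP (fun x => decide (port ≤ x)) :=
        List.countP_mono_left (by intro x _ hx; simp_all; omega)
      simp
      omega
    · have := ih hm
      simp only [List.countP_cons]
      split_ifs <;> simp_all <;> omega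

-- while port in used: port += 1
def pvProbe (used : List Int) (port : Int) : Int :=
  if port ∈ used then pvProbe used (port + 1) else port
termination_by used.countP (fun x => decide (port ≤ x))
decreasing_by exact pv_countP_lt used port (by assumption)

def next_bluemap_port (servers : List (String × List (String × Int))) : Int :=
  pvProbe (pvUsedA servers) 8100

-- ===== PORT B =====
-- the for loop with continue / increment / break
def pvScan : List Int → Int → Int
  | [], c => c
  | p :: rest, c => if p < c then pvScan rest c else if p = c then pvScan rest (c + 1) else c

def next_bluemap_port_alt (servers : List (String × List (String × Int))) : Int :=
  pvScan (PySem.List.sorted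
            ((servers.map (·.2)).filterMap (fun s => pvGetBluemap s))
            (fun x => x) false)
         8100

-- ===== PRECONDITION & SPEC =====
def Spec_next_bluemap_port (servers : List (String × List (String × Int))) (out : Int) : Prop := out = next_bluemap_port_alt servers
instance (servers : List (String × List (String × Int))) (out : Int) : Decidable (Spec_next_bluemap_port servers out) := by unfold Spec_next_bluemap_port; infer_instance

-- ===== CLAIM (what is proved, stated in full; the proofs are below) =====
def Claim_equal_next_bluemap_port : Prop := ∀ (servers : List (String × List (String × Int))), Dom_next_bluemap_port servers → Spec_next_bluemap_port servers (next_bluemap_port servers)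

-- ===== LEMMAS AND PROOFS =====

-- A's used set has the same members as the list B sorts
theorem mem_pvUsedA (servers : List (String × List (String × Int))) (x : Int) :
    x ∈ pvUsedA servers ↔ x ∈ (servers.map (·.2)).filterMap (fun s => pvGetBluemap s) := by
  have key : ∀ (l : List (String × List (String × Int))) (acc : PySem.Set Int),
      x ∈ l.foldl (fun used sv =>
        match pvGetBluemap sv.2 with
        | some p => PySem.Set.add used p
        | none => used) acc ↔ x ∈ acc ∨ x ∈ (l.map (·.2)).filterMap (fun s => pvGetBluemap s) := by
    intro l
    induction l with
    | nil => simp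
    | cons a t ih =>
      intro acc
      cases h : pvGetBluemap a.2 with
      | none => simp [List.foldl_cons, h, ih]
      | some p =>
        simp [List.foldl_cons, h, ih, PySem.Set.mem_add]
        tauto
  simpa using key servers PySem.Set.empty

-- the while loop returns the least port ≥ start not in used
theorem pvProbe_spec (used : List Int) (port : Int) :
    port ≤ pvProbe used port ∧ pvProbe used port ∉ used ∧
      ∀ k, port ≤ k → k < pvProbe used port → k ∈ used := by
  fun_induction pvProbe used port with
  | case1 port h ih =>
    refine ⟨by have := ih.1; omega, ih.2.1, ?_⟩
    intro k hk1 hk2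
    rcases eq_or_lt_of_le hk1 with rfl | hlt
    · exact h
    · exact ih.2.2 k (by omega) hk2
  | case2 port h =>
    exact ⟨le_refl _, h, by omega⟩

-- the scan over a sorted list returns the least port ≥ start not in the list
theorem pvScan_spec (L : List Int) (c : Int) (hs : L.Pairwise (· ≤ ·)) :
    c ≤ pvScan L c ∧ pvScan L c ∉ L ∧
      ∀ k, c ≤ k → k < pvScan L c → k ∈ L := by
  induction L generalizing c with
  | nil =>
    refine ⟨by simp [pvScan], by simp [pvScan], ?_⟩
    intro k hk1 hk2
    simp [pvScan] at hk2
    omega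
  | cons p rest ih =>
    have hrest : rest.Pairwise (· ≤ ·) := hs.of_cons
    have hall : ∀ y ∈ rest, p ≤ y := fun y hy => List.rel_of_pairwise_cons hs hy
    by_cases h1 : p < c
    · obtain ⟨hle, hnm, hin⟩ := ih c hrest
      refine ⟨by simpa [pvScan, h1] using hle, ?_, ?_⟩
      · simp only [pvScan, if_pos h1, List.mem_cons]
        rintro (rfl | hm)
        · omega
        · exact hnm hm
      · intro k hk1 hk2
        simp only [pvScan, if_pos h1] at hk2
        exact List.mem_cons_of_mem _ (hin k hk1 hk2)
    · by_cases h2 : p = c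
      · obtain ⟨hle, hnm, hin⟩ := ih (c + 1) hrest
        have hrw : pvScan (p :: rest) c = pvScan rest (c + 1) := by
          simp [pvScan, h2]
        refine ⟨by omega, ?_, ?_⟩
        · rw [hrw]
          simp only [List.mem_cons]
          rintro (heq | hm)
          · omega
          · exact hnm hm
        · intro k hk1 hk2
          rw [hrw] at hk2
          rcases eq_or_lt_of_le hk1 with rfl | hlt
          · simp [h2]
          · exact List.mem_cons_of_mem _ (hin k (by omega) hk2)
      · have hrw : pvScan (p :: rest) c = c := by simp [pvScan, h1, h2]
        refine ⟨by omega, ?_, by omega⟩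
        rw [hrw]
        simp only [List.mem_cons]
        rintro (rfl | hm)
        · omega
        · have := hall _ hm; omega

-- ===== VERDICT (by name: the statement is the Claim_ definition above) =====
theorem next_bluemap_port_spec : Claim_equal_next_bluemap_port := by
  intro servers _
  unfold Spec_next_bluemap_port next_bluemap_port next_bluemap_port_alt
  set coll := (servers.map (·.2)).filterMap (fun s => pvGetBluemap s) with hcoll
  set L := PySem.List.sorted coll (fun x => x) false with hL
  have hmem : ∀ k : Int, k ∈ pvUsedA servers ↔ k ∈ L := by
    intro k
    rw [mem_pvUsedA, hL, PySem.List.mem_sorted]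
  obtain ⟨ha1, ha2, ha3⟩ := pvProbe_spec (pvUsedA servers) 8100
  obtain ⟨hb1, hb2, hb3⟩ :=
    pvScan_spec L 8100 (by simpa using PySem.List.sorted_pairwise coll (fun x => x))
  rcases lt_trichotomy (pvProbe (pvUsedA servers) 8100) (pvScan L 8100) with h | h | h
  · exact absurd ((hmem _).mpr (hb3 _ ha1 h)) ha2
  · exact h
  · exact absurd ((hmem _).mp (ha3 _ hb1 h)) hb2
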